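-- pv_equiv track=rewrite | github.com/yeji0214/Algorithm-Python | Baekjoon/2851.py | mushroom
-- ===== SOURCE A (Python) =====
-- def mushroom(scores):
--     total = 0
--     result = []
--
--     for s in scores:
--         total += s
--         if total >= 100:
--             break
--     else:
--         result.append(total)
--         return result
--
--     if total - s <= 100:
--         result.append(total - s)
--     result.append(total)
--     return result
-- ===== SOURCE B (Python) =====
-- def mushroom(scores):
--     prefix = [0]
--     for s in scores:
--         prefix.append(prefix[-1] + s)
--     for prev, cur in zip(prefix, prefix[1:]):
--         if cur >= 100:
--             return [prev, cur]
--     return [prefix[-1]]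
-- ===== Notes on version B (the rewrite author's own statement) =====
-- stated objective: alternative
-- what changed: Replaces A's single early-breaking accumulation loop (with a for/else branch and the total-s guard) by building an explicit prefix-sum table and then a separate pairwise scan over adjacent table entries.
import Mathlib
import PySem

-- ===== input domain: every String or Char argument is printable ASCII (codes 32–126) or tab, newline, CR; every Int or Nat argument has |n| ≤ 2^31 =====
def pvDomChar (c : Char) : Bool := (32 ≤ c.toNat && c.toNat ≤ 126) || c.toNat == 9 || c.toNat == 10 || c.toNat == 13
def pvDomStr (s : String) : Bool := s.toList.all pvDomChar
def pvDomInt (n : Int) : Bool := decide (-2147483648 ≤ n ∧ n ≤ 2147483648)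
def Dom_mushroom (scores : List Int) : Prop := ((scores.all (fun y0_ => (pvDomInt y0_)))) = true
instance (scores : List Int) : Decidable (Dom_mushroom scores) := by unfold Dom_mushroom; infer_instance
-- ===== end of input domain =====

-- B (mushroom_alt) replaces A's early-breaking accumulation loop by an explicit prefix-sum table plus a separate adjacent-pair scan (alternative decomposition, same cost).


-- ===== PORT A =====
-- loop with break/else: recurses while total < 100
def mushroomLoop (total : Int) (scores : List Int) : List Int :=
  match scores with
  | [] => [total]                                   -- for/else: result.append(total); return
  | s :: rest =>
    let total' := total + s
    if total' ≥ 100 then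
      (if total' - s ≤ 100 then [total' - s, total'] else [total'])
    else mushroomLoop total' rest

def mushroom (scores : List Int) : List Int :=
  mushroomLoop 0 scores

-- ===== PORT B =====
-- scan of zip(prefix, prefix[1:]); singleton = loop exhausted, return [prefix[-1]]
def scanPairs : List Int → List Int
  | a :: b :: rest => if b ≥ 100 then [a, b] else scanPairs (b :: rest)
  | [a] => [a]
  | [] => []

def mushroom_alt (scores : List Int) : List Int :=
  scanPairs (scores.foldl (fun p s => p ++ [p.getLastD 0 + s]) [0])

-- ===== PRECONDITION & SPEC =====
def Spec_mushroom (scores : List Int) (out : List Int) : Prop := out = mushroom_alt scores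
instance (scores : List Int) (out : List Int) : Decidable (Spec_mushroom scores out) := by unfold Spec_mushroom; infer_instance

-- ===== CLAIM (what is proved, stated in full; the proofs are below) =====
def Claim_equal_mushroom : Prop := ∀ (scores : List Int), Dom_mushroom scores → Spec_mushroom scores (mushroom scores)

-- ===== LEMMAS AND PROOFS =====

-- ===== VERDICT (by name: the statement is the Claim_ definition above) =====
-- pure prefix-sum list: [total, total+s1, total+s1+s2, ...]
def prefixesAux (total : Int) : List Int → List Int
  | [] => [total]
  | s :: rest => total :: prefixesAux (total + s) rest

theorem foldl_build_eq (scores : List Int) : ∀ (acc : List Int) (t : Int),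
    scores.foldl (fun p s => p ++ [p.getLastD 0 + s]) (acc ++ [t]) = acc ++ prefixesAux t scores := by
  induction scores with
  | nil => intro acc t; simp [prefixesAux]
  | cons s rest ih =>
    intro acc t
    have hl : (acc ++ [t]).getLastD 0 = t := by simp
    simp only [List.foldl_cons, hl, prefixesAux]
    have := ih (acc ++ [t]) (t + s)
    simpa using this

theorem loop_eq_scan (scores : List Int) : ∀ (total : Int), total ≤ 100 →
    mushroomLoop total scores = scanPairs (prefixesAux total scores) := by
  induction scores with
  | nil => intro total _; simp [mushroomLoop, prefixesAux, scanPairs]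
  | cons s rest ih =>
    intro total htot
    simp only [mushroomLoop, prefixesAux]
    cases rest with
    | nil =>
      simp only [prefixesAux, scanPairs]
      by_cases h : total + s ≥ 100
      · simp [h, show total + s - s = total by omega, htot]
      · simp [h, mushroomLoop]
    | cons s2 rest2 =>
      simp only [prefixesAux, scanPairs]
      by_cases h : total + s ≥ 100
      · simp [h, show total + s - s = total by omega, htot]
      · have := ih (total + s) (by omega)
        simp only [prefixesAux] at this
        simp [h, this]

theorem mushroom_spec : Claim_equal_mushroom := by
  intro scores _
  unfold Spec_mushroom mushroom mushroom_alt
  have hb := foldl_build_eq scores [] 0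
  simp only [List.nil_append] at hb
  rw [hb, loop_eq_scan scores 0 (by omega)]
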